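-- pv_equiv track=rewrite | github.com/LeonidBolshakov/FTP_Galaxy2 | src/SYNC_APP/APP/SERVICES/repository_validator.py | get_dublicate_component
-- ===== SOURCE A (Python) =====
-- from collections import defaultdict
--
-- def get_dublicate_component(component_names: list[str]) -> dict[str, int]:
--     """Подсчитывает количество повторов для каждого компонента.
--
--     Parameters
--     ----------
--     component_names
--         Имена компонентов (возможно с повторами).
--
--     Returns
--     -------
--     dict[str, int]
--         Словарь: имя компонента -> число "дополнительных" вхождений.
--         Например, если компонент встретился 3 раза, значение будет 2.
--     """
--     dublicate_components: dict[str, int] = defaultdict(int)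
--     sorted_component_names = sorted(component_names)
--     component_name_prev: str | None = None
--     for component_name in sorted_component_names:
--         if component_name == component_name_prev:
--             dublicate_components[component_name] += 1
--         component_name_prev = component_name
--
--     return dublicate_components
-- ===== SOURCE B (Python) =====
-- from collections import defaultdict
--
-- def get_dublicate_component(component_names: list[str]) -> dict[str, int]:
--     counts: dict[str, int] = defaultdict(int)
--     for name in component_names:
--         counts[name] += 1
--     dublicate_components: dict[str, int] = defaultdict(int)
--     for name in sorted(counts):
--         if counts[name] > 1:
--             dublicate_components[name] = counts[name] - 1
--     return dublicate_components
-- ===== Notes on version B (the rewrite author's own statement) =====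
-- stated objective: simpler
-- what changed: Instead of sorting the whole list and comparing each element with its predecessor, B builds a frequency table in one pass over the unsorted list and then emits name -> count-1 for each of the (far fewer) distinct names with count > 1, sorting only the distinct names so the resulting dict is identical key-for-key.
import Mathlib
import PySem

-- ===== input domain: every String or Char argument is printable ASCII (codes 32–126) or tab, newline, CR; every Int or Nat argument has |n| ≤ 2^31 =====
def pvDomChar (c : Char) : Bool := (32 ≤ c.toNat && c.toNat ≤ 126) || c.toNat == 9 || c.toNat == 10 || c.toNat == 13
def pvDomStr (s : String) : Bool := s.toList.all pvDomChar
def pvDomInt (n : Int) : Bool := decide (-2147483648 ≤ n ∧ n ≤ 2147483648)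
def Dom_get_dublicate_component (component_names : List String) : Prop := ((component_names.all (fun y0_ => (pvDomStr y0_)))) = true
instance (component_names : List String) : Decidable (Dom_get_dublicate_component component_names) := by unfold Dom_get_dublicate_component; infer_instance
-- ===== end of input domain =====

-- B (simpler): one counting pass over the unsorted list plus a pass over the sorted distinct
-- names, instead of A's sort of the whole list with a previous-element comparison scan.

-- ===== PORT A =====
-- loop body of A: 'if component_name == component_name_prev: dublicate_components[component_name] += 1'
def pvStepA (st : PySem.Dict String Int × Option String) (component_name : String) :
    PySem.Dict String Int × Option String :=
  ((if some component_name = st.2 then st.1.modify component_name 0 (· + 1) else st.1),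
   some component_name)

def get_dublicate_component (component_names : List String) : List (String × Int) :=
  let sorted_component_names := PySem.List.sorted component_names (fun x => x) false
  ((sorted_component_names.foldl pvStepA (PySem.Dict.empty, none)).1).items

-- ===== PORT B =====
def get_dublicate_component_alt (component_names : List String) : List (String × Int) :=
  let counts := component_names.foldl (fun d name => d.modify name 0 (· + 1)) PySem.Dict.empty
  ((PySem.List.sorted counts.keys (fun x => x) false).foldl
      (fun d name => if (1 : Int) < counts.getD name 0 then d.insert name (counts.getD name 0 - 1) else d)
      PySem.Dict.empty).items

-- ===== PRECONDITION & SPEC =====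
def Spec_get_dublicate_component (component_names : List String) (out : List (String × Int)) : Prop := out = get_dublicate_component_alt component_names
instance (component_names : List String) (out : List (String × Int)) : Decidable (Spec_get_dublicate_component component_names out) := by unfold Spec_get_dublicate_component; infer_instance

-- ===== CLAIM (what is proved, stated in full; the proofs are below) =====
def Claim_equal_get_dublicate_component : Prop := ∀ (component_names : List String), Dom_get_dublicate_component component_names → Spec_get_dublicate_component component_names (get_dublicate_component component_names)

-- ===== LEMMAS AND PROOFS =====

-- the run of duplicates of `a`: r extra occurrences contribute [(a, r)] (nothing if r = 0)
def pvRunOut (a : String) (r : Nat) : List (String × Int) :=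
  if r = 0 then [] else [(a, (r : Int))]

-- the common value: per distinct name with count > 1, the pair (name, count - 1)
def pvOutS (s : List String) : List (String × Int) :=
  ((PySem.Set.ofList s).filter (fun k => decide (1 < s.count k))).map
    (fun k => (k, (s.count k : Int) - 1))

lemma pvDiscard_eq_filter (s : PySem.Set String) (x : String) :
    PySem.Set.discard s x = s.filter (fun y => y != x) := rfl

lemma pvModify_eq_insert (d : PySem.Dict String Int) (k : String) :
    d.modify k 0 (· + 1) = d.insert k (d.getD k 0 + 1) := rfl

lemma pvOfList_filter (t : List String) (x : String) :
    PySem.Set.ofList (t.filter (fun y => y != x)) =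
      (PySem.Set.ofList t).filter (fun y => y != x) := by
  induction t with
  | nil => rfl
  | cons z t ih =>
    by_cases hz : z = x
    · subst hz
      simp only [List.filter_cons, bne_self_eq_false, PySem.Set.ofList_cons, ih,
        Bool.false_eq_true, if_false]
      rw [PySem.Set.discard]
      simp only [List.filter_filter]
      congr 1
      funext y
      by_cases hy : y = z <;> simp [hy]
    · simp only [List.filter_cons, PySem.Set.ofList_cons, bne_iff_ne, hz, if_pos,
        ne_eq, not_false_iff, ih]
      rw [PySem.Set.discard, PySem.Set.discard]
      simp only [List.filter_filter]
      exact congrArg (z :: ·) (List.filter_congr (fun a _ => Bool.and_comm _ _))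

lemma pvOfList_sublist (t : List String) : (PySem.Set.ofList t).Sublist t := by
  induction t with
  | nil => simp [PySem.Set.ofList_nil]
  | cons z t ih =>
    rw [PySem.Set.ofList_cons, PySem.Set.discard]
    exact (List.filter_sublist.trans ih).cons₂ z

lemma pvOutS_cons (x : String) (t : List String) :
    pvOutS (x :: t) = pvRunOut x (t.count x) ++ pvOutS (t.filter (fun y => y != x)) := by
  unfold pvOutS pvRunOut
  rw [PySem.Set.ofList_cons, pvDiscard_eq_filter, pvOfList_filter, List.filter_cons]
  have hcx : (x :: t).count x = t.count x + 1 := List.count_cons_self ..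
  have hck : ∀ k : String, ¬ k = x → (x :: t).count k = t.count k := by
    intro k hk
    have hk' : ¬ x = k := fun h => hk (Eq.symm h)
    simp [hk']
  have hcf : ∀ k : String, ¬ k = x → (t.filter (fun y => y != x)).count k = t.count k := by
    intro k hk
    simp [List.count_filter, hk]
  have hmemL : ∀ a ∈ (PySem.Set.ofList t).filter (fun y => y != x), ¬ a = x := by
    intro a ha
    simpa using (List.mem_filter.mp ha).2
  have htail :
      (((PySem.Set.ofList t).filter (fun y => y != x)).filter
          (fun k => decide (1 < (x :: t).count k))).map (fun k => (k, ((x :: t).count k : Int) - 1))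
        = (((PySem.Set.ofList t).filter (fun y => y != x)).filter
            (fun k => decide (1 < (t.filter (fun y => y != x)).count k))).map
            (fun k => (k, ((t.filter (fun y => y != x)).count k : Int) - 1)) := by
    have hfilt :
        ((PySem.Set.ofList t).filter (fun y => y != x)).filter
            (fun k => decide (1 < (x :: t).count k))
          = ((PySem.Set.ofList t).filter (fun y => y != x)).filter
              (fun k => decide (1 < (t.filter (fun y => y != x)).count k)) :=
      List.filter_congr (fun a ha => by rw [hck a (hmemL a ha), hcf a (hmemL a ha)])
    rw [hfilt]
    apply List.map_congr_left
    intro a ha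
    have hax := hmemL a (List.mem_of_mem_filter ha)
    rw [hck a hax, hcf a hax]
  by_cases h0 : t.count x = 0
  · have hfalse : ¬ (decide (1 < (x :: t).count x) = true) := by simp [hcx, h0]
    rw [if_neg hfalse, if_pos h0, List.nil_append]
    exact htail
  · have htrue : decide (1 < (x :: t).count x) = true := by
      rw [hcx]
      simpa using Nat.pos_of_ne_zero h0
    rw [if_pos htrue, if_neg h0, List.map_cons, htail, hcx]
    show _ :: _ = _ :: _
    congr 1
    · congr 1
      push_cast
      ring

lemma pvLoopA_run (t : List String) :
    ∀ (a : String) (c : Nat) (d0 : PySem.Dict String Int),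
    t.Pairwise (· ≤ ·) → (∀ x ∈ t, a ≤ x) → d0.keys.Nodup → a ∉ d0.keys →
    (∀ k ∈ d0.keys, k ∉ t) →
    (t.foldl pvStepA ((if c = 0 then d0 else d0.insert a (c : Int)), some a)).1
      = PySem.Dict.mk (d0.items ++ pvRunOut a (c + t.count a)
          ++ pvOutS (t.filter (fun y => y != a))) := by
  induction t with
  | nil =>
    intro a c d0 _ _ _ ha _
    have hcont : d0.contains a = false := by
      rw [PySem.Dict.contains_eq_decide_mem_keys]
      simp [ha]
    by_cases hc : c = 0
    · simp [hc, pvRunOut, pvOutS, PySem.Set.ofList_nil]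
    · rw [if_neg hc]
      apply PySem.Dict.ext
      rw [List.foldl_nil]
      rw [PySem.Dict.items_insert_of_not_contains _ _ hcont]
      simp [pvRunOut, hc, pvOutS, PySem.Set.ofList_nil]
  | cons x t' ih =>
    intro a c d0 hpw hall hnd ha hdisj
    have hcont : d0.contains a = false := by
      rw [PySem.Dict.contains_eq_decide_mem_keys]
      simp [ha]
    have hDitems : (if c = 0 then d0 else d0.insert a (c : Int)).items
        = d0.items ++ pvRunOut a c := by
      by_cases hc : c = 0
      · simp [hc, pvRunOut]
      · rw [if_neg hc, PySem.Dict.items_insert_of_not_contains _ _ hcont]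
        simp [pvRunOut, hc]
    rw [List.foldl_cons]
    by_cases hx : x = a
    · subst hx
      -- duplicate step: the dict gains one more at x
      have hstep : pvStepA ((if c = 0 then d0 else d0.insert x (c : Int)), some x) x
          = ((if c + 1 = 0 then d0 else d0.insert x ((c + 1 : Nat) : Int)), some x) := by
        unfold pvStepA
        rw [if_pos rfl, pvModify_eq_insert]
        by_cases hc : c = 0
        · simp [hc, PySem.Dict.getD_of_not_contains _ _ hcont]
        · rw [if_neg hc, if_neg (by omega)]
          rw [PySem.Dict.getD_insert_self, PySem.Dict.insert_insert_self]
          push_cast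
          ring_nf
      rw [hstep]
      rw [ih x (c + 1) d0 hpw.of_cons (fun y hy => (List.pairwise_cons.mp hpw).1 y hy)
        hnd ha (fun k hk => fun hmem => hdisj k hk (List.mem_cons_of_mem _ hmem))]
      have hcount : c + 1 + t'.count x = c + (x :: t').count x := by
        rw [List.count_cons_self]
        omega
      rw [hcount]
      have hfilt : (x :: t').filter (fun y => y != x) = t'.filter (fun y => y != x) := by
        simp
      rw [hfilt]
    · -- run of a is over: fresh previous element x
      have hxa : a < x := lt_of_le_of_ne (hall x (List.mem_cons_self)) (fun h => hx h.symm)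
      have hanot : a ∉ x :: t' := by
        intro hmem
        rcases List.mem_cons.mp hmem with h | h
        · exact hx h.symm
        · exact absurd ((List.pairwise_cons.mp hpw).1 a h) (not_le.mpr hxa)
      have hstep : pvStepA ((if c = 0 then d0 else d0.insert a (c : Int)), some a) x
          = ((if c = 0 then d0 else d0.insert a (c : Int)), some x) := by
        unfold pvStepA
        rw [if_neg (by simp [hx])]
      rw [hstep]
      set D := (if c = 0 then d0 else d0.insert a (c : Int)) with hD
      have hDnd : D.keys.Nodup := by
        by_cases hc : c = 0
        · simpa [hD, hc] using hnd
        · rw [hD, if_neg hc]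
          exact PySem.Dict.nodup_keys_insert _ _ _ hnd
      have hDkeys : ∀ k, k ∈ D.keys → k = a ∨ k ∈ d0.keys := by
        intro k hk
        by_cases hc : c = 0
        · right; simpa [hD, hc] using hk
        · rw [hD, if_neg hc] at hk
          exact (PySem.Dict.mem_keys_insert _ _ _ _).mp hk
      have hxD : x ∉ D.keys := by
        intro hk
        rcases hDkeys x hk with h | h
        · exact hx h
        · exact hdisj x h (List.mem_cons_self)
      have hDdisj : ∀ k ∈ D.keys, k ∉ t' := by
        intro k hk hmem
        rcases hDkeys k hk with h | h
        · subst h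
          exact hanot (List.mem_cons_of_mem _ hmem)
        · exact hdisj k h (List.mem_cons_of_mem _ hmem)
      have := ih x 0 D hpw.of_cons (fun y hy => (List.pairwise_cons.mp hpw).1 y hy)
        hDnd hxD hDdisj
      rw [if_pos rfl] at this
      rw [this]
      -- now rewrite the right-hand side
      have hca : (x :: t').count a = 0 := List.count_eq_zero.mpr hanot
      have hfa : (x :: t').filter (fun y => y != a) = x :: t' := by
        apply List.filter_eq_self.mpr
        intro y hy
        simp only [bne_iff_ne, ne_eq]
        intro h
        exact hanot (h ▸ hy)
      rw [hca, hfa, pvOutS_cons, hDitems, Nat.add_zero]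
      simp [List.append_assoc]

lemma pvA_char (xs : List String) :
    get_dublicate_component xs = pvOutS (PySem.List.sorted xs (fun x => x) false) := by
  simp only [get_dublicate_component]
  have hpw : (PySem.List.sorted xs (fun x => x) false).Pairwise (· ≤ ·) := by
    simpa using PySem.List.sorted_pairwise xs (fun x => x)
  generalize hs : PySem.List.sorted xs (fun x => x) false = s at hpw ⊢
  cases s with
  | nil =>
    show (PySem.Dict.empty : PySem.Dict String Int).items = pvOutS []
    simp [pvOutS, PySem.Set.ofList_nil]
    rfl
  | cons a t =>
    rw [List.foldl_cons]
    have hstep : pvStepA (PySem.Dict.empty, none) a = (PySem.Dict.empty, some a) := by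
      unfold pvStepA
      simp
    rw [hstep]
    have h0 : (PySem.Dict.empty : PySem.Dict String Int) =
        (if (0 : Nat) = 0 then (PySem.Dict.empty : PySem.Dict String Int)
         else PySem.Dict.empty.insert a ((0 : Nat) : Int)) := by simp
    rw [h0, pvLoopA_run t a 0 PySem.Dict.empty hpw.of_cons
      (fun y hy => (List.pairwise_cons.mp hpw).1 y hy)
      (by simp [PySem.Dict.keys_empty]) (by simp [PySem.Dict.keys_empty])
      (by simp [PySem.Dict.keys_empty])]
    rw [pvOutS_cons]
    show [] ++ pvRunOut a (0 + t.count a) ++ pvOutS (t.filter (fun y => y != a))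
        = pvRunOut a (t.count a) ++ pvOutS (t.filter (fun y => y != a))
    simp

lemma pvFoldlIf (l : List String) (d : PySem.Dict String Int) (P : String → Prop)
    [DecidablePred P] (v : String → Int) :
    l.foldl (fun d n => if P n then d.insert n (v n) else d) d
      = (l.filter (fun n => decide (P n))).foldl (fun d n => d.insert n (v n)) d := by
  induction l generalizing d with
  | nil => rfl
  | cons x l ih =>
    rw [List.foldl_cons, List.filter_cons]
    by_cases hx : P x
    · simp only [hx, if_pos, decide_true, List.foldl_cons]
      exact ih _
    · simp only [hx, decide_false, Bool.false_eq_true, if_false]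
      exact ih _

lemma pvSorted_ofList (xs : List String) :
    PySem.Set.ofList (PySem.List.sorted xs (fun x => x) false)
      = PySem.List.sorted (PySem.Set.ofList xs) (fun x => x) false := by
  have hpw : (PySem.List.sorted xs (fun x => x) false).Pairwise (· ≤ ·) := by
    simpa using PySem.List.sorted_pairwise xs (fun x => x)
  have hsub := pvOfList_sublist (PySem.List.sorted xs (fun x => x) false)
  have hle : (PySem.Set.ofList (PySem.List.sorted xs (fun x => x) false)).Pairwise (· ≤ ·) :=
    hpw.sublist hsub
  have hnd : (PySem.Set.ofList (PySem.List.sorted xs (fun x => x) false)).Nodup :=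
    PySem.Set.nodup_ofList _
  have hlt : (PySem.Set.ofList (PySem.List.sorted xs (fun x => x) false)).Pairwise (· < ·) :=
    (hle.and hnd).imp (fun h => lt_of_le_of_ne h.1 h.2)
  have hperm : (PySem.Set.ofList (PySem.List.sorted xs (fun x => x) false)).Perm
      (PySem.Set.ofList xs) := by
    rw [List.perm_ext_iff_of_nodup hnd (PySem.Set.nodup_ofList _)]
    intro a
    rw [PySem.Set.mem_ofList, PySem.Set.mem_ofList, PySem.List.mem_sorted]
  exact (PySem.List.sorted_eq_of_perm_of_pairwise_lt (PySem.Set.ofList xs)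
    (PySem.Set.ofList (PySem.List.sorted xs (fun x => x) false)) (fun x => x)
    hperm (by simpa using hlt)).symm

lemma pvB_char (xs : List String) :
    get_dublicate_component_alt xs =
      ((PySem.List.sorted (PySem.Set.ofList xs) (fun x => x) false).filter
          (fun k => decide (1 < xs.count k))).map
        (fun k => (k, (xs.count k : Int) - 1)) := by
  simp only [get_dublicate_component_alt]
  have hc : xs.foldl (fun d name => d.modify name 0 (· + 1)) PySem.Dict.empty
      = PySem.Dict.counter xs := (PySem.Dict.counter_eq_foldl xs).symm
  rw [hc, PySem.Dict.keys_counter]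
  rw [pvFoldlIf _ _ (fun n => (1 : Int) < (PySem.Dict.counter xs).getD n 0)
    (fun n => (PySem.Dict.counter xs).getD n 0 - 1)]
  have hsorted_lt := PySem.List.sorted_ofList_pairwise_lt xs
  have hnd : (PySem.List.sorted (PySem.Set.ofList xs) (fun x => x) false).Nodup :=
    hsorted_lt.imp ne_of_lt
  rw [PySem.Dict.items_foldl_insert_fresh
    ((PySem.List.sorted (PySem.Set.ofList xs) (fun x => x) false).filter
      (fun n => decide (1 < (PySem.Dict.counter xs).getD n 0)))
    (fun a => a) (fun n => (PySem.Dict.counter xs).getD n 0 - 1) PySem.Dict.empty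
    (fun a _ => by simp [PySem.Dict.contains_empty])
    (by simpa using hnd.filter _)]
  have hgetD : ∀ n, (PySem.Dict.counter xs).getD n 0 = (xs.count n : Int) :=
    fun n => PySem.Dict.getD_counter xs n
  simp only [hgetD]
  have hempty : (PySem.Dict.empty : PySem.Dict String Int).items = [] := rfl
  rw [hempty, List.nil_append]
  congr 1
  apply List.filter_congr
  intro a _
  simp [Nat.one_lt_cast]

-- ===== VERDICT (by name: the statement is the Claim_ definition above) =====
theorem get_dublicate_component_spec : Claim_equal_get_dublicate_component := by
  intro xs _
  unfold Spec_get_dublicate_component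
  rw [pvA_char, pvB_char, pvOutS, pvSorted_ofList]
  have hc : ∀ k, (PySem.List.sorted xs (fun x => x) false).count k = xs.count k :=
    fun k => (PySem.List.sorted_perm xs (fun x => x) false).count_eq k
  simp only [hc]
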